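-- pv_equiv track=rewrite | github.com/Justawayx/malaria_resistome_2023 | CNV_calling_validation/CNV_validation_final.py | filter_pos_count_dict_to_window
-- ===== SOURCE A (Python) =====
-- from collections import defaultdict
--
-- def filter_pos_count_dict_to_window(pos_count_dict, window=300):
--
-- 	if len(pos_count_dict) == 0:
-- 		return pos_count_dict
--
-- 	sorted_pos_list = sorted(pos_count_dict.keys())
-- 	window_count_dict = defaultdict(int)
--
-- 	for i in range(len(sorted_pos_list)):
-- 		start_pos = sorted_pos_list[i]; j = i
-- 		while j < len(sorted_pos_list) and sorted_pos_list[j] < start_pos + window: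
-- 			window_count_dict[start_pos] += pos_count_dict[sorted_pos_list[j]]; j += 1
--
-- 	max_count_start_pos, max_count = sorted(window_count_dict.items(), key=lambda x: x[1])[-1]
--
-- 	new_pos_count_dict = defaultdict(int)
-- 	for pos in sorted_pos_list:
-- 		if pos >= max_count_start_pos and pos < (max_count_start_pos + window):
-- 			new_pos_count_dict[pos] = pos_count_dict[pos]
--
-- 	return new_pos_count_dict
-- ===== SOURCE B (Python) =====
-- def filter_pos_count_dict_to_window(pos_count_dict, window=300):
--
-- 	if len(pos_count_dict) == 0:
-- 		return pos_count_dict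
--
-- 	pts = sorted(pos_count_dict.items(), key=lambda p: p[0])
-- 	n = len(pts)
--
-- 	# One left-to-right sweep: j/cur form a sliding window [i, j) with a running
-- 	# sum; '>=' keeps the later (largest) start on ties, as A's stable sort does.
-- 	best_sum = None
-- 	best_start = 0
-- 	cur = 0
-- 	j = 0
-- 	for i in range(n):
-- 		while j < n and pts[j][0] < pts[i][0] + window:
-- 			cur += pts[j][1]
-- 			j += 1
-- 		if best_sum is None or cur >= best_sum:
-- 			best_sum = cur
-- 			best_start = pts[i][0]
-- 		cur -= pts[i][1]
--
-- 	return {p: c for p, c in pts if best_start <= p < best_start + window}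
-- ===== Notes on version B (the rewrite author's own statement) =====
-- stated objective: faster
-- what changed: A re-scans and re-sums the window for every start position (nested loop) and then stable-sorts the per-start sums to pick the maximum; B makes one two-pointer sweep over the sorted items with a running window sum, keeping the best (max sum, ties -> largest start) as it goes.
import Mathlib
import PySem

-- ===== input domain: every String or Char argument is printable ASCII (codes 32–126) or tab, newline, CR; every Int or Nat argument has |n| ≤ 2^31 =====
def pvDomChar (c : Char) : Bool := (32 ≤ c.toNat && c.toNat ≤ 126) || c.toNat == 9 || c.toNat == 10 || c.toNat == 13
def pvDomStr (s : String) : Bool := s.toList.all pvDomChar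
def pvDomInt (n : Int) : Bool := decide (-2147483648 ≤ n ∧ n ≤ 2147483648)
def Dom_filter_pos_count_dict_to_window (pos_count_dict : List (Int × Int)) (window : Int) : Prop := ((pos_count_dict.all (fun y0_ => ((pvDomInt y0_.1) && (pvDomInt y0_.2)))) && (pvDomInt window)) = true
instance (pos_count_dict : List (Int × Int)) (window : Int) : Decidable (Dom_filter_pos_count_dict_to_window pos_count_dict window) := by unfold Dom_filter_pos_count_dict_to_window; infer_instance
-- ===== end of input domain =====

-- B replaces A's nested per-start window re-summation by one left-to-right sweep with a
-- sliding window and running sum (max sum, ties -> largest start); objective: faster.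

-- ===== PORT A =====
def pvAInner (dd : PySem.Dict Int Int) (start window : Int) :
    List Int → PySem.Dict Int Int → PySem.Dict Int Int
  | [], acc => acc
  | q :: rest, acc =>
      if q < start + window then
        pvAInner dd start window rest (acc.modify start 0 (· + dd.getD q 0))
      else acc

def pvAOuter (dd : PySem.Dict Int Int) (window : Int) :
    List Int → PySem.Dict Int Int → PySem.Dict Int Int
  | [], acc => acc
  | p :: rest, acc => pvAOuter dd window rest (pvAInner dd p window (p :: rest) acc)

def filter_pos_count_dict_to_window (pos_count_dict : List (Int × Int)) (window : Int) : List (Int × Int) :=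
  if pos_count_dict.length = 0 then pos_count_dict
  else
    let dd := PySem.Dict.mk pos_count_dict
    let sorted_pos_list := PySem.List.sorted dd.keys (fun x => x) false
    let window_count_dict := pvAOuter dd window sorted_pos_list PySem.Dict.empty
    let best := PySem.List.pyGetD (PySem.List.sorted window_count_dict.items (fun x => x.2) false) (-1) (0, 0)
    let max_count_start_pos := best.1
    (sorted_pos_list.foldl
      (fun nd pos =>
        if max_count_start_pos ≤ pos ∧ pos < max_count_start_pos + window then
          nd.insert pos (dd.getD pos 0)
        else nd)
      PySem.Dict.empty).items

-- ===== PORT B =====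
def pvBInner (pts : List (Int × Int)) (bound : Int) (j : Nat) (cur : Int) : Nat × Int :=
  if h : j < pts.length then
    if (pts[j]).1 < bound then pvBInner pts bound (j + 1) (cur + (pts[j]).2)
    else (j, cur)
  else (j, cur)
termination_by pts.length - j

def pvBOuter (pts : List (Int × Int)) (window : Int) (i j : Nat) (cur : Int)
    (best_sum : Option Int) (best_start : Int) : Int :=
  if h : i < pts.length then
    let r := pvBInner pts ((pts[i]).1 + window) j cur
    if best_sum.isNone || decide (best_sum.getD 0 ≤ r.2) then
      pvBOuter pts window (i + 1) r.1 (r.2 - (pts[i]).2) (some r.2) (pts[i]).1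
    else
      pvBOuter pts window (i + 1) r.1 (r.2 - (pts[i]).2) best_sum best_start
  else best_start
termination_by pts.length - i

def filter_pos_count_dict_to_window_alt (pos_count_dict : List (Int × Int)) (window : Int) : List (Int × Int) :=
  if pos_count_dict.length = 0 then pos_count_dict
  else
    let pts := PySem.List.sorted pos_count_dict (fun p => p.1) false
    let best_start := pvBOuter pts window 0 0 0 none 0
    (pts.foldl
      (fun nd p =>
        if best_start ≤ p.1 ∧ p.1 < best_start + window then nd.insert p.1 p.2 else nd)
      PySem.Dict.empty).items

-- ===== PRECONDITION & SPEC =====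
-- Pre_ excludes (a) association lists with duplicate keys — they do not represent a
-- Python dict, which is what A receives (dict construction collapses them) — and
-- (b) window ≤ 0 when the dict has entries, where A raises IndexError (sorted([])[-1]).
def Pre_filter_pos_count_dict_to_window (pos_count_dict : List (Int × Int)) (window : Int) : Prop :=
  (pos_count_dict.map Prod.fst).Nodup ∧ (pos_count_dict = [] ∨ 0 < window)
instance (pos_count_dict : List (Int × Int)) (window : Int) : Decidable (Pre_filter_pos_count_dict_to_window pos_count_dict window) := by unfold Pre_filter_pos_count_dict_to_window; infer_instance

def pvWitness_filter_pos_count_dict_to_window : (List (Int × Int)) × Int := ([(1, 2), (5, 1), (9, 4)], 5)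

def Spec_filter_pos_count_dict_to_window (pos_count_dict : List (Int × Int)) (window : Int) (out : List (Int × Int)) : Prop := out = filter_pos_count_dict_to_window_alt pos_count_dict window
instance (pos_count_dict : List (Int × Int)) (window : Int) (out : List (Int × Int)) : Decidable (Spec_filter_pos_count_dict_to_window pos_count_dict window out) := by unfold Spec_filter_pos_count_dict_to_window; infer_instance

-- ===== CLAIM (what is proved, stated in full; the proofs are below) =====
def Claim_equal_filter_pos_count_dict_to_window : Prop := ∀ (pos_count_dict : List (Int × Int)) (window : Int), Dom_filter_pos_count_dict_to_window pos_count_dict window → Pre_filter_pos_count_dict_to_window pos_count_dict window → Spec_filter_pos_count_dict_to_window pos_count_dict window (filter_pos_count_dict_to_window pos_count_dict window)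

-- ===== LEMMAS AND PROOFS =====

def pvWL (dd : PySem.Dict Int Int) (w : Int) : List Int → List (Int × Int)
  | [] => []
  | p :: rest =>
      (p, (((p :: rest).takeWhile (fun q => decide (q < p + w))).map (fun q => dd.getD q 0)).sum)
        :: pvWL dd w rest

def pvWLB (w : Int) : List (Int × Int) → List (Int × Int)
  | [] => []
  | p :: rest =>
      (p.1, (((p :: rest).takeWhile (fun q => decide (q.1 < p.1 + w))).map (fun q => q.2)).sum)
        :: pvWLB w rest

def pvFoldlPair (q : Int × Int) (l : List (Int × Int)) : Int × Int :=
  l.foldl (fun q p => if q.2 ≤ p.2 then p else q) q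

def pvBfold : Option Int → Int → List (Int × Int) → Int
  | _, bstart, [] => bstart
  | best, bstart, p :: rest =>
      if best.isNone || decide (best.getD 0 ≤ p.2) then pvBfold (some p.2) p.1 rest
      else pvBfold best bstart rest

theorem pvInsertGetD {d : PySem.Dict Int Int} {k : Int} (d0 : Int)
    (hc : d.contains k = true) (hn : d.keys.Nodup) : d.insert k (d.getD k d0) = d := by
  apply PySem.Dict.ext
  rw [PySem.Dict.items_insert_of_contains _ _ hc]
  conv_rhs => rw [← List.map_id d.items]
  apply List.map_congr_left
  intro p hp
  by_cases h : p.1 = k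
  · subst h
    simp only [beq_self_eq_true, if_pos]
    rw [PySem.Dict.getD_of_mem_items d (k := p.1) (v := p.2) (by exact hp) hn d0]; rfl
  · simp [h]

theorem pvGetLastCons {α : Type} (y : α) (l : List α) (h : l ≠ []) :
    (y :: l).getLast? = l.getLast? := by
  cases l with
  | nil => simp at h
  | cons a as => simp [List.getLast?_cons_cons]

theorem pvAInner_eq (dd : PySem.Dict Int Int) (k w : Int) (t : List Int) :
    ∀ (acc : PySem.Dict Int Int), acc.contains k = true → acc.keys.Nodup →
    pvAInner dd k w t acc
      = acc.insert k (acc.getD k 0 + ((t.takeWhile (fun q => decide (q < k + w))).map (fun q => dd.getD q 0)).sum) := by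
  induction t with
  | nil => intro acc hc hn; simpa using (pvInsertGetD 0 hc hn).symm
  | cons q rest ih =>
    intro acc hc hn
    by_cases hq : q < k + w
    · rw [pvAInner, if_pos hq]
      rw [ih _ (by simp [PySem.Dict.modify]) (by
        exact PySem.Dict.nodup_keys_insert _ _ _ hn)]
      simp only [PySem.Dict.modify, PySem.Dict.insert_insert_self, PySem.Dict.getD_insert_self]
      rw [List.takeWhile_cons_of_pos (by simpa using hq)]
      simp [add_assoc]
    · rw [pvAInner, if_neg hq, List.takeWhile_cons_of_neg (by simpa using hq)]
      simpa using (pvInsertGetD 0 hc hn).symm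

theorem pvAOuter_items (dd : PySem.Dict Int Int) (w : Int) (hw : 0 < w) :
    ∀ (l : List Int) (acc : PySem.Dict Int Int),
      l.Pairwise (· < ·) → (∀ x ∈ l, acc.contains x = false) → acc.keys.Nodup →
      (pvAOuter dd w l acc).items = acc.items ++ pvWL dd w l := by
  intro l
  induction l with
  | nil => intro acc _ _ _; simp [pvAOuter, pvWL]
  | cons p rest ih =>
    intro acc hpw hf hn
    have hfp : acc.contains p = false := hf p (by simp)
    have hq : p < p + w := by omega
    rw [pvAOuter, pvAInner, if_pos hq]
    rw [pvAInner_eq dd p w rest (acc.modify p 0 (· + dd.getD p 0))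
      (by simp [PySem.Dict.modify])
      (by exact PySem.Dict.nodup_keys_insert _ _ _ (by exact hn))]
    simp only [PySem.Dict.modify, PySem.Dict.insert_insert_self, PySem.Dict.getD_insert_self]
    rw [PySem.Dict.getD_of_not_contains acc 0 hfp]
    set S := ((rest.takeWhile (fun q => decide (q < p + w))).map (fun q => dd.getD q 0)).sum with hS
    have hacc2 : (acc.insert p (0 + dd.getD p 0 + S)).items = acc.items ++ [(p, 0 + dd.getD p 0 + S)] :=
      PySem.Dict.items_insert_of_not_contains acc _ hfp
    rw [ih (acc.insert p (0 + dd.getD p 0 + S)) (List.Pairwise.of_cons hpw)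
      (by
        intro x hx
        rw [PySem.Dict.contains_insert]
        have hne : x ≠ p := by
          have := (List.pairwise_cons.mp hpw).1 x hx; omega
        simp [hne, hf x (by simp [hx])])
      (PySem.Dict.nodup_keys_insert _ _ _ hn)]
    rw [hacc2, pvWL]
    rw [List.takeWhile_cons_of_pos (by simpa using hq)]
    simp [hS]

theorem pvWL_eq_pvWLB (dd : PySem.Dict Int Int) (w : Int) :
    ∀ pts : List (Int × Int), (∀ p ∈ pts, dd.getD p.1 0 = p.2) →
      pvWL dd w (pts.map Prod.fst) = pvWLB w pts := by
  intro pts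
  induction pts with
  | nil => intro _; rfl
  | cons p rest ih =>
    intro hlk
    have : (p :: rest).map Prod.fst = p.1 :: rest.map Prod.fst := rfl
    rw [this, pvWL, pvWLB, ih (fun q hq => hlk q (by simp [hq]))]
    congr 1
    congr 1
    rw [show (p.1 :: rest.map Prod.fst) = (p :: rest).map Prod.fst from rfl]
    rw [List.takeWhile_map]
    rw [List.map_map]
    have htw : ∀ q ∈ (p :: rest).takeWhile (fun q => decide (q.1 < p.1 + w)), dd.getD q.1 0 = q.2 := by
      intro q hq
      exact hlk q ((List.takeWhile_prefix _).subset hq)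
    calc (List.map ((fun q => dd.getD q 0) ∘ Prod.fst) ((p :: rest).takeWhile fun q => decide (q.1 < p.1 + w))).sum
        = (List.map (fun q => q.2) ((p :: rest).takeWhile fun q => decide (q.1 < p.1 + w))).sum := by
          congr 1
          apply List.map_congr_left
          intro q hq
          simpa using htw q hq

theorem pvBInner_eq (pts : List (Int × Int)) (bnd : Int) :
    ∀ (j : Nat) (cur : Int),
      pvBInner pts bnd j cur
        = (j + ((pts.drop j).takeWhile (fun p => decide (p.1 < bnd))).length,
           cur + (((pts.drop j).takeWhile (fun p => decide (p.1 < bnd))).map (fun q => q.2)).sum) := by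
  intro j
  induction hfuel : pts.length - j using Nat.strong_induction_on generalizing j with
  | _ fuel ih =>
  intro cur
  by_cases h : j < pts.length
  · rw [List.drop_eq_getElem_cons h]
    by_cases hc : (pts[j]).1 < bnd
    · rw [pvBInner, dif_pos h, if_pos hc, List.takeWhile_cons_of_pos (by simpa using hc)]
      rw [ih (pts.length - (j+1)) (by omega) (j+1) rfl (cur + (pts[j]).2)]
      simp [add_assoc]
      omega
    · rw [pvBInner, dif_pos h, if_neg hc, List.takeWhile_cons_of_neg (by simpa using hc)]
      simp
  · rw [pvBInner, dif_neg h]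
    rw [List.drop_eq_nil_of_le (by omega)]
    simp

theorem pvFoldStep (l : List (Int × Int)) : ∀ q : Int × Int,
    l.foldl (fun b p => match b with
          | none => some p
          | some q => if q.2 ≤ p.2 then some p else some q) (some q) = some (pvFoldlPair q l) := by
  induction l with
  | nil => intro q; rfl
  | cons p rest ih =>
    intro q
    simp only [List.foldl_cons, pvFoldlPair]
    by_cases h : q.2 ≤ p.2 <;> simp [h, ih, pvFoldlPair]

theorem pvBfold_some (l : List (Int × Int)) : ∀ (b s : Int),
    pvBfold (some b) s l = (pvFoldlPair (s, b) l).1 := by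
  induction l with
  | nil => intro b s; rfl
  | cons p rest ih =>
    intro b s
    rw [pvBfold]
    by_cases h : b ≤ p.2
    · simp only [Option.isNone_some, Bool.false_or, Option.getD_some, decide_eq_true_eq, h,
        if_pos, pvFoldlPair, List.foldl_cons]
      rw [ih]
      simp [pvFoldlPair]
    · simp only [Option.isNone_some, Bool.false_or, Option.getD_some, decide_eq_true_eq, h,
        pvFoldlPair, List.foldl_cons]
      rw [ih b s]
      simp [pvFoldlPair]

theorem pvLastIns (x : Int × Int) (ys : List (Int × Int))
    (hs : ys.Pairwise (fun a b => a.2 ≤ b.2)) :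
    (PySem.List.insertBy (fun a b => decide (a.2 < b.2)) x ys).getLast?
      = match ys.getLast? with
        | none => some x
        | some l => if l.2 ≤ x.2 then some x else some l := by
  induction ys with
  | nil => rfl
  | cons y ys ih =>
    rw [PySem.List.insertBy]
    by_cases hb : x.2 < y.2
    · simp only [hb, decide_true, if_pos]
      -- result x :: y :: ys; last = last of (y :: ys)
      have hl : (y :: ys).getLast? = some ((y :: ys).getLast (by simp)) :=
        List.getLast?_eq_some_getLast _
      rw [show (x :: y :: ys).getLast? = (y :: ys).getLast? from by
        simp [List.getLast?_cons_cons]]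
      rw [hl]
      have hmem : (y :: ys).getLast (by simp) ∈ y :: ys := List.getLast_mem _
      have hyl : y.2 ≤ ((y :: ys).getLast (by simp)).2 := by
        rcases List.mem_cons.mp hmem with h | h
        · rw [h]
        · exact (List.pairwise_cons.mp hs).1 _ h
      have : ¬ ((y :: ys).getLast (by simp)).2 ≤ x.2 := by omega
      simp [this]
    · simp only [hb, decide_false, Bool.false_eq_true, reduceIte]
      -- result y :: insertBy x ys
      have hne : PySem.List.insertBy (fun a b => decide (a.2 < b.2)) x ys ≠ [] := by
        cases ys with
        | nil => simp [PySem.List.insertBy]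
        | cons z zs =>
          rw [PySem.List.insertBy]
          by_cases h : x.2 < z.2 <;> simp [h]
      rw [pvGetLastCons y _ hne]
      rw [ih (List.Pairwise.of_cons hs)]
      cases hys : ys.getLast? with
      | none =>
        have : ys = [] := by cases ys; rfl; simp at hys
        subst this
        simp [List.getLast?_singleton]
        omega
      | some l =>
        have hys_ne : ys ≠ [] := by rintro rfl; simp at hys
        rw [show (y :: ys).getLast? = ys.getLast? from pvGetLastCons y ys hys_ne]
        rw [hys]

theorem pvSortedLast (wl : List (Int × Int)) :
    (PySem.List.sorted wl (fun x => x.2) false).getLast?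
      = wl.foldl (fun b p => match b with
          | none => some p
          | some q => if q.2 ≤ p.2 then some p else some q) none := by
  induction wl using List.reverseRecOn with
  | nil => rfl
  | append_singleton wl x ih =>
    have hsapp : PySem.List.sorted (wl ++ [x]) (fun q : Int × Int => q.2) false
        = PySem.List.insertBy (fun a b => decide (a.2 < b.2)) x (PySem.List.sorted wl (fun q => q.2) false) := by
      rw [PySem.List.sorted_eq_foldl_insertBy, PySem.List.sorted_eq_foldl_insertBy, List.foldl_append]
      rfl
    rw [hsapp, pvLastIns x _ (PySem.List.sorted_pairwise wl (fun q => q.2)), ih, List.foldl_append]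
    rfl

theorem pvBOuter_eq (pts : List (Int × Int)) (w : Int) (hw : 0 < w)
    (hp : pts.Pairwise (fun a b => a.1 ≤ b.1)) :
    ∀ (i j : Nat) (cur : Int) (best : Option Int) (bstart : Int),
      i ≤ j → j ≤ pts.length →
      (∀ (hi : i < pts.length) (k : Nat) (hk : k < pts.length), i ≤ k → k < j → (pts[k]).1 < (pts[i]).1 + w) →
      cur = (((pts.drop i).take (j - i)).map (fun q => q.2)).sum →
      pvBOuter pts w i j cur best bstart = pvBfold best bstart (pvWLB w (pts.drop i)) := by
  intro i
  induction hfuel : pts.length - i using Nat.strong_induction_on generalizing i with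
  | _ fuel ih =>
  intro j cur best bstart hij hjn hbnd hcur
  by_cases h : i < pts.length
  · -- notation
    set pred := (fun p : Int × Int => decide (p.1 < (pts[i]).1 + w)) with hpred
    have hdropi : pts.drop i = pts[i] :: pts.drop (i + 1) := List.drop_eq_getElem_cons h
    set seg := (pts.drop i).take (j - i) with hseg
    have hsegdrop : pts.drop i = seg ++ pts.drop j := by
      have hdd : List.drop (j - i) (List.drop i pts) = List.drop j pts := by
        rw [List.drop_drop]
        congr 1
        omega
      rw [hseg, ← hdd, List.take_append_drop]
    have hsegall : ∀ a ∈ seg, pred a = true := by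
      intro a ha
      rw [hseg] at ha
      obtain ⟨m, hm, rfl⟩ := List.mem_iff_getElem.mp ha
      have hm' : m < j - i := by
        have := hm; simp [List.length_take] at this; omega
      have hmd : m < (pts.drop i).length := by
        simp; omega
      rw [List.getElem_take (h := by simpa using hm), List.getElem_drop (h := hmd)]
      have := hbnd h (i + m) (by simp at hmd; omega) (by omega) (by omega)
      simpa [hpred] using this
    have hsegtw : seg.takeWhile pred = seg := List.takeWhile_eq_self_iff.mpr hsegall
    have htwAll : (pts.drop i).takeWhile pred = seg ++ (pts.drop j).takeWhile pred := by
      rw [hsegdrop, List.takeWhile_append, hsegtw, if_pos rfl]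
    set twj := (pts.drop j).takeWhile pred with htwj
    set j' := j + twj.length with hj'
    have hr : pvBInner pts ((pts[i]).1 + w) j cur
        = (j', cur + (twj.map (fun q => q.2)).sum) := pvBInner_eq pts _ j cur
    have hlenAll : ((pts.drop i).takeWhile pred).length = j' - i := by
      rw [htwAll]
      simp [hseg, List.length_take]
      omega
    have hcur' : cur + (twj.map (fun q => q.2)).sum
        = (((pts.drop i).takeWhile pred).map (fun q => q.2)).sum := by
      rw [htwAll, hcur]
      simp
    -- head of pvWLB on drop i
    have hWLB : pvWLB w (pts.drop i)
        = ((pts[i]).1, (((pts.drop i).takeWhile pred).map (fun q => q.2)).sum)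
            :: pvWLB w (pts.drop (i + 1)) := by
      rw [hdropi, pvWLB, ← hdropi]
    -- invariant data for the recursive call
    have hlenodrop : ((pts.drop i).takeWhile pred).length ≤ pts.length - i := by
      calc ((pts.drop i).takeWhile pred).length ≤ (pts.drop i).length :=
        (List.takeWhile_prefix pred).length_le
      _ = pts.length - i := by simp
    have hj'n : j' ≤ pts.length := by omega
    have hij' : i + 1 ≤ j' := by
      have hone : 1 ≤ ((pts.drop i).takeWhile pred).length := by
        rw [hdropi, List.takeWhile_cons_of_pos (by simp [hpred]; omega)]
        simp
      omega
    have htwAllTake : (pts.drop i).takeWhile pred = (pts.drop i).take (j' - i) := by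
      rw [(List.prefix_iff_eq_take.mp (List.takeWhile_prefix pred)), hlenAll]
    have hbnd' : ∀ (hi1 : i + 1 < pts.length) (k : Nat) (hk : k < pts.length),
        i + 1 ≤ k → k < j' → (pts[k]).1 < (pts[i+1]).1 + w := by
      intro hi1 k hk hk1 hk2
      have hki : k - i < ((pts.drop i).takeWhile pred).length := by omega
      have hkd : k - i < (pts.drop i).length := by simp; omega
      have hpe : ((pts.drop i).takeWhile pred)[k - i] = pts[k] := by
        rw [(List.takeWhile_prefix pred).getElem hki]
        simp only [List.getElem_drop]
        congr 1
        omega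
      have hmem : pts[k] ∈ (pts.drop i).takeWhile pred := by
        rw [← hpe]; exact List.getElem_mem hki
      have hkb : (pts[k]).1 < (pts[i]).1 + w := by
        have := List.mem_takeWhile_imp hmem
        simpa [hpred] using this
      have hmono : (pts[i]).1 ≤ (pts[i+1]).1 :=
        List.pairwise_iff_getElem.mp hp i (i+1) h hi1 (by omega)
      omega
    have hcur'' : (cur + (twj.map (fun q => q.2)).sum) - (pts[i]).2
        = (((pts.drop (i+1)).take (j' - (i+1))).map (fun q => q.2)).sum := by
      rw [hcur', htwAllTake]
      rw [hdropi]
      rw [show j' - i = (j' - (i+1)) + 1 from by omega, List.take_succ_cons]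
      simp
    have hihcall : ∀ best2 bstart2, pvBOuter pts w (i+1) j' ((cur + (twj.map (fun q => q.2)).sum) - (pts[i]).2) best2 bstart2
        = pvBfold best2 bstart2 (pvWLB w (pts.drop (i+1))) := by
      intro best2 bstart2
      exact ih (pts.length - (i+1)) (by omega) (i+1) rfl j' _ best2 bstart2 hij' hj'n hbnd' hcur''
    rw [pvBOuter, dif_pos h]
    simp only [hr]
    rw [hWLB, pvBfold]
    by_cases hcond : (best.isNone || decide (best.getD 0 ≤ cur + (twj.map (fun q => q.2)).sum)) = true
    · rw [if_pos hcond, if_pos (by simpa [hcur'] using hcond)]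
      rw [hihcall, hcur']
    · rw [if_neg hcond, if_neg (by simpa [hcur'] using hcond)]
      exact hihcall best bstart
  · rw [pvBOuter, dif_neg h]
    rw [List.drop_eq_nil_of_le (by omega)]
    rfl

theorem pvMain (d : List (Int × Int)) (w : Int)
    (hnd : (d.map Prod.fst).Nodup) (hor : d = [] ∨ 0 < w) :
    filter_pos_count_dict_to_window d w = filter_pos_count_dict_to_window_alt d w := by
  by_cases hd : d = []
  · subst hd; rfl
  · have hw : 0 < w := by tauto
    have hlen : ¬ d.length = 0 := by simpa using hd
    rw [filter_pos_count_dict_to_window, filter_pos_count_dict_to_window_alt, if_neg hlen, if_neg hlen]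
    dsimp only
    set dd := PySem.Dict.mk d with hdd
    set pts := PySem.List.sorted d (fun p => p.1) false with hpts
    have hddk : dd.keys = d.map Prod.fst := by
      simp [PySem.Dict.keys, hdd]
    have h1 : pts.Perm d := PySem.List.sorted_perm d _ false
    have h2 : pts.Pairwise (fun a b => a.1 ≤ b.1) := PySem.List.sorted_pairwise d _
    have h3 : (pts.map Prod.fst).Nodup := ((h1.map Prod.fst).nodup_iff).mpr hnd
    have h4 : (pts.map Prod.fst).Pairwise (· < ·) := by
      have hle : (pts.map Prod.fst).Pairwise (· ≤ ·) := List.pairwise_map.mpr h2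
      have := hle.and (List.nodup_iff_pairwise_ne.mp h3)
      exact this.imp (fun {a b} hab => lt_of_le_of_ne hab.1 hab.2)
    have h5 : PySem.List.sorted dd.keys (fun x => x) false = pts.map Prod.fst := by
      rw [hddk]
      exact PySem.List.sorted_eq_of_perm_of_pairwise_lt _ _ _ (h1.map Prod.fst) h4
    have h6 : ∀ p ∈ pts, dd.getD p.1 0 = p.2 := by
      intro p hp
      have hpd : p ∈ d := ((PySem.List.mem_sorted _ _ _ _).mp hp)
      have hitems : (p.1, p.2) ∈ dd.items := by simpa [hdd, PySem.Dict.items] using hpd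
      have hknd : dd.keys.Nodup := by rw [hddk]; exact hnd
      exact PySem.Dict.getD_of_mem_items dd hitems hknd 0
    rw [h5]
    have h7 : (pvAOuter dd w (pts.map Prod.fst) PySem.Dict.empty).items = pvWLB w pts := by
      rw [pvAOuter_items dd w hw _ _ h4 (by intro x _; simp [PySem.Dict.contains_empty]) (by simp [PySem.Dict.keys_empty])]
      rw [pvWL_eq_pvWLB dd w pts h6]
      rfl
    rw [h7]
    have h8 : pts ≠ [] := by
      rw [hpts]
      simpa [PySem.List.sorted_eq_nil_iff] using hd
    -- selection agreement
    obtain ⟨p0, rest0, hcons⟩ := List.exists_cons_of_ne_nil h8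
    have hwlb_cons : pvWLB w pts
        = (p0.1, ((pts.takeWhile (fun q => decide (q.1 < p0.1 + w))).map (fun q => q.2)).sum)
            :: pvWLB w rest0 := by
      rw [hcons, pvWLB, ← hcons]
    have hwlb_ne : pvWLB w pts ≠ [] := by rw [hwlb_cons]; simp
    have hsne : PySem.List.sorted (pvWLB w pts) (fun x => x.2) false ≠ [] := by
      simpa [PySem.List.sorted_eq_nil_iff] using hwlb_ne
    rw [PySem.List.pyGetD_neg_one _ _ hsne]
    have hlast : (PySem.List.sorted (pvWLB w pts) (fun x => x.2) false).getLast hsne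
        = pvFoldlPair (p0.1, ((pts.takeWhile (fun q => decide (q.1 < p0.1 + w))).map (fun q => q.2)).sum) (pvWLB w rest0) := by
      have h9 := pvSortedLast (pvWLB w pts)
      rw [List.getLast?_eq_some_getLast hsne] at h9
      conv at h9 => rhs; rw [hwlb_cons]
      rw [List.foldl_cons] at h9
      rw [pvFoldStep] at h9
      exact Option.some_injective _ h9
    rw [hlast]
    have hB : pvBOuter pts w 0 0 0 none 0
        = (pvFoldlPair (p0.1, ((pts.takeWhile (fun q => decide (q.1 < p0.1 + w))).map (fun q => q.2)).sum) (pvWLB w rest0)).1 := by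
      rw [pvBOuter_eq pts w hw h2 0 0 0 none 0 (le_refl 0) (by omega) (by intro _ k _ _ h0; omega) (by simp)]
      rw [List.drop_zero, hwlb_cons, pvBfold]
      simp only [Option.isNone_none, Bool.true_or, if_pos]
      rw [pvBfold_some]
    rw [hB]
    -- final filter agreement
    set m := (pvFoldlPair (p0.1, ((pts.takeWhile (fun q => decide (q.1 < p0.1 + w))).map (fun q => q.2)).sum) (pvWLB w rest0)).1 with hm
    have hfunA : (fun (nd : PySem.Dict Int Int) pos => if m ≤ pos ∧ pos < m + w then nd.insert pos (dd.getD pos 0) else nd)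
        = (fun nd pos => if (fun x => decide (m ≤ x ∧ x < m + w)) pos = true then nd.insert pos (dd.getD pos 0) else nd) := by
      funext nd pos; simp
    have hfunB : (fun (nd : PySem.Dict Int Int) (p : Int × Int) => if m ≤ p.1 ∧ p.1 < m + w then nd.insert p.1 p.2 else nd)
        = (fun nd p => if (fun q : Int × Int => decide (m ≤ q.1 ∧ q.1 < m + w)) p = true then nd.insert p.1 p.2 else nd) := by
      funext nd p; simp
    rw [hfunA, hfunB, ← List.foldl_filter, ← List.foldl_filter]
    set flA := (pts.map Prod.fst).filter (fun x => decide (m ≤ x ∧ x < m + w)) with hflA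
    set flB := pts.filter (fun q : Int × Int => decide (m ≤ q.1 ∧ q.1 < m + w)) with hflB
    have hIA : (List.foldl (fun (nd : PySem.Dict Int Int) pos => nd.insert pos (dd.getD pos 0)) PySem.Dict.empty flA).items
        = flA.map (fun a => (a, dd.getD a 0)) := by
      rw [PySem.Dict.items_foldl_insert_fresh flA (fun a => a) (fun a => dd.getD a 0) PySem.Dict.empty
        (by intro a _; rfl)
        (by simpa [hflA] using h3.filter (fun x => decide (m ≤ x ∧ x < m + w)))]
      rfl
    have hIB : (List.foldl (fun (nd : PySem.Dict Int Int) (p : Int × Int) => nd.insert p.1 p.2) PySem.Dict.empty flB).items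
        = flB.map (fun p => (p.1, p.2)) := by
      rw [PySem.Dict.items_foldl_insert_fresh flB (fun p => p.1) (fun p => p.2) PySem.Dict.empty
        (by intro a _; rfl)
        (by
          have hsub : (flB.map Prod.fst).Sublist (pts.map Prod.fst) :=
            (List.filter_sublist (l := pts)).map Prod.fst
          exact hsub.nodup h3)]
      rfl
    rw [hIA, hIB]
    have hflAB : flA = flB.map Prod.fst := by
      rw [hflA, hflB, List.filter_map]
      rfl
    rw [hflAB, List.map_map]
    have : ∀ p ∈ flB, ((fun a => (a, dd.getD a 0)) ∘ Prod.fst) p = (fun p : Int × Int => (p.1, p.2)) p := by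
      intro p hp
      have hmem : p ∈ pts := List.mem_of_mem_filter hp
      simp [h6 p hmem]
    exact List.map_congr_left this

-- ===== VERDICT (by name: the statement is the Claim_ definition above) =====
theorem filter_pos_count_dict_to_window_spec : Claim_equal_filter_pos_count_dict_to_window := by
  intro pos_count_dict window _hdom hpre
  unfold Spec_filter_pos_count_dict_to_window
  exact pvMain pos_count_dict window hpre.1 hpre.2
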